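-- pv_equiv track=rewrite | github.com/jad2192/advent_of_code_2023 | solutions/day02.py | get_min_colors_per_game
-- ===== SOURCE A (Python) =====
-- from typing import Dict, List, Tuple, TypeAlias
--
-- RGBCounts: TypeAlias = Tuple[int, int, int]
--
-- def get_min_colors_per_game(game_results: List[List[str]]) -> Dict[int, RGBCounts]:
--     min_count_dict = {}
--     for k, game in enumerate(game_results):
--         min_r, min_g, min_b = 0, 0, 0
--         for round in game:
--             for color in round.split(", "):
--                 match color.split(" "):
--                     case [num_cube, "red"]:
--                         min_r = max(min_r, int(num_cube))
--                     case [num_cube, "green"]: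
--                         min_g = max(min_g, int(num_cube))
--                     case [num_cube, "blue"]:
--                         min_b = max(min_b, int(num_cube))
--         min_count_dict[k + 1] = (min_r, min_g, min_b)
--     return min_count_dict
-- ===== SOURCE B (Python) =====
-- def get_min_colors_per_game(game_results):
--     out = {}
--     for k, game in enumerate(game_results):
--         parts = [tok.split(" ") for rnd in game for tok in rnd.split(", ")]
--         def cmax(color):
--             return max([0] + [int(p[0]) for p in parts if len(p) == 2 and p[1] == color])
--         out[k + 1] = (cmax("red"), cmax("green"), cmax("blue"))
--     return out
-- ===== Notes on version B (the rewrite author's own statement) =====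
-- stated objective: alternative
-- what changed: A's inline three-way running-max fold over tokens is replaced by a gather step that flattens each game into split token parts once, followed by three independent filter-and-max reductions (one per color).
import Mathlib
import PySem

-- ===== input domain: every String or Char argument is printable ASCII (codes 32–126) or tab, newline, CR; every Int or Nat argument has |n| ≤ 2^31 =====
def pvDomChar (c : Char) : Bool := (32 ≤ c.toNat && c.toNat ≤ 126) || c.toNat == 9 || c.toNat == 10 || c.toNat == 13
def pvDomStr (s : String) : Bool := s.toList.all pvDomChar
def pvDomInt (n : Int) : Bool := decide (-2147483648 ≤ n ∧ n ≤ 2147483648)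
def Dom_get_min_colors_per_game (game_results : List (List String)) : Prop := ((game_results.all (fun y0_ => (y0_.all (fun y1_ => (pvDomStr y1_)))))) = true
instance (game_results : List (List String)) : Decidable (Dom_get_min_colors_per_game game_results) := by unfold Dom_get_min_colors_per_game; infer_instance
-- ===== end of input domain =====

-- B replaces A's inline three-way running-max fold by a gather pass (flatten each game
-- into split token parts once) followed by three independent filter-and-max reductions;
-- same cost, different decomposition (objective: alternative).

-- ===== PORT A =====
-- s.split(sep) for a non-empty literal sep: split? is some there, so getD [] is exact
def pvSplit (s sep : String) : List String := (PySem.Str.split? s sep).getD []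

-- the body of A's innermost 'match color.split(" ")' statement
def pvStepA (acc : Int × Int × Int) (color : String) : Int × Int × Int :=
  match pvSplit color " " with
  | [num_cube, c] =>
      if c = "red" then (max acc.1 ((PySem.Int.ofStr? num_cube).getD 0), acc.2.1, acc.2.2)
      else if c = "green" then (acc.1, max acc.2.1 ((PySem.Int.ofStr? num_cube).getD 0), acc.2.2)
      else if c = "blue" then (acc.1, acc.2.1, max acc.2.2 ((PySem.Int.ofStr? num_cube).getD 0))
      else acc
  | _ => acc

def get_min_colors_per_game (game_results : List (List String)) : List (Int × Int × Int × Int) :=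
  ((PySem.List.enumerate game_results 0).foldl
    (fun d kg => d.insert (kg.1 + 1)
      (kg.2.foldl (fun acc rnd => (pvSplit rnd ", ").foldl pvStepA acc) (0, 0, 0)))
    PySem.Dict.empty).items

-- ===== PORT B =====
-- parts = [tok.split(" ") for rnd in game for tok in rnd.split(", ")]
def pvParts (game : List String) : List (List String) :=
  game.flatMap (fun rnd => (pvSplit rnd ", ").map (fun tok => pvSplit tok " "))

-- cmax(color) = max([0] + [int(p[0]) for p in parts if len(p) == 2 and p[1] == color])
def pvCmax (parts : List (List String)) (color : String) : Int :=
  (parts.filterMap (fun p => match p with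
      | [num, c] => if c = color then some ((PySem.Int.ofStr? num).getD 0) else none
      | _ => none)).foldl max 0

def get_min_colors_per_game_alt (game_results : List (List String)) : List (Int × Int × Int × Int) :=
  (PySem.List.enumerate game_results 0).map (fun kg =>
    let parts := pvParts kg.2
    (kg.1 + 1, pvCmax parts "red", pvCmax parts "green", pvCmax parts "blue"))

-- ===== PRECONDITION & SPEC =====
-- a token is fine unless it matches '[num, color]' for one of the three colors with num not int()-parseable
def pvTokOk (tok : String) : Bool :=
  match pvSplit tok " " with
  | [num, c] => !(c == "red" || c == "green" || c == "blue") || (PySem.Int.ofStr? num).isSome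
  | _ => true

-- Pre_ excludes exactly the inputs on which A raises ValueError: a token of the form
-- '<num> red|green|blue' whose <num> is not accepted by int().
def Pre_get_min_colors_per_game (game_results : List (List String)) : Prop :=
  (game_results.all (fun game => game.all (fun rnd => (pvSplit rnd ", ").all pvTokOk))) = true
instance (game_results : List (List String)) : Decidable (Pre_get_min_colors_per_game game_results) := by
  unfold Pre_get_min_colors_per_game; infer_instance

def pvWitness_get_min_colors_per_game : List (List String) :=
  [["3 red, 5 blue", "2 green, 1 red"], ["12 blue"]]

def Spec_get_min_colors_per_game (game_results : List (List String)) (out : List (Int × Int × Int × Int)) : Prop := out = get_min_colors_per_game_alt game_results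
instance (game_results : List (List String)) (out : List (Int × Int × Int × Int)) : Decidable (Spec_get_min_colors_per_game game_results out) := by unfold Spec_get_min_colors_per_game; infer_instance

-- ===== CLAIM (what is proved, stated in full; the proofs are below) =====
def Claim_equal_get_min_colors_per_game : Prop := ∀ (game_results : List (List String)), Dom_get_min_colors_per_game game_results → Pre_get_min_colors_per_game game_results → Spec_get_min_colors_per_game game_results (get_min_colors_per_game game_results)

-- ===== LEMMAS AND PROOFS =====

-- selector: the value a token contributes to the given color's bucket
def pvSel (color : String) (tok : String) : Option Int :=
  match pvSplit tok " " with
  | [num, c] => if c = color then some ((PySem.Int.ofStr? num).getD 0) else none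
  | _ => none

theorem pvStep_fold (ts : List String) :
    ∀ r g b : Int, ts.foldl pvStepA (r, g, b) =
      ((ts.filterMap (pvSel "red")).foldl max r,
       (ts.filterMap (pvSel "green")).foldl max g,
       (ts.filterMap (pvSel "blue")).foldl max b) := by
  induction ts with
  | nil => intro r g b; rfl
  | cons t ts ih =>
    intro r g b
    simp only [List.foldl_cons, List.filterMap_cons]
    rcases h : pvSplit t " " with _ | ⟨num, _ | ⟨c, _ | ⟨x, rest⟩⟩⟩
    · simp [pvStepA, pvSel, h, ih]
    · simp [pvStepA, pvSel, h, ih]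
    · by_cases hr : c = "red"
      · subst hr; simp [pvStepA, pvSel, h, ih]
      · by_cases hg : c = "green"
        · subst hg; simp [pvStepA, pvSel, h, hr, ih]
        · by_cases hb : c = "blue"
          · subst hb; simp [pvStepA, pvSel, h, hr, hg, ih]
          · simp [pvStepA, pvSel, h, hr, hg, hb, ih]
    · simp [pvStepA, pvSel, h, ih]

theorem pvFoldl_foldl {α β γ : Type} (g : β → List α) (f : γ → α → γ) :
    ∀ (l : List β) (acc : γ),
      l.foldl (fun acc rnd => (g rnd).foldl f acc) acc = (l.flatMap g).foldl f acc := by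
  intro l
  induction l with
  | nil => intro acc; rfl
  | cons x xs ih => intro acc; simp [List.foldl_append, ih]

theorem pvCmax_eq (game : List String) (color : String) :
    pvCmax (pvParts game) color =
      ((game.flatMap (fun rnd => pvSplit rnd ", ")).filterMap (pvSel color)).foldl max 0 := by
  simp only [pvCmax, pvParts, pvSel]
  rw [← List.map_flatMap, List.filterMap_map]
  rfl

theorem pvGame_eq (game : List String) :
    game.foldl (fun acc rnd => (pvSplit rnd ", ").foldl pvStepA acc) ((0 : Int), (0 : Int), (0 : Int)) =
      (pvCmax (pvParts game) "red", pvCmax (pvParts game) "green", pvCmax (pvParts game) "blue") := by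
  rw [pvFoldl_foldl, pvStep_fold, pvCmax_eq, pvCmax_eq, pvCmax_eq]

theorem pvKeys_nodup (gr : List (List String)) :
    ((PySem.List.enumerate gr 0).map (fun kg : Int × List String => kg.1 + 1)).Nodup := by
  have h := PySem.List.pairwise_lt_enumerate gr 0
  have h2 : ((PySem.List.enumerate gr 0).map (fun kg : Int × List String => kg.1 + 1)).Pairwise (· < ·) :=
    List.pairwise_map.mpr (h.imp (fun hpq => by omega))
  exact h2.imp (fun hlt => ne_of_lt hlt)

-- ===== VERDICT (by name: the statement is the Claim_ definition above) =====
theorem get_min_colors_per_game_spec : Claim_equal_get_min_colors_per_game := by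
  intro gr _ _
  unfold Spec_get_min_colors_per_game get_min_colors_per_game get_min_colors_per_game_alt
  rw [PySem.Dict.items_foldl_insert_fresh (PySem.List.enumerate gr 0)
        (fun kg : Int × List String => kg.1 + 1)
        (fun kg : Int × List String =>
          kg.2.foldl (fun acc rnd => (pvSplit rnd ", ").foldl pvStepA acc) (0, 0, 0))
        PySem.Dict.empty
        (fun a _ => PySem.Dict.contains_empty _) (pvKeys_nodup gr)]
  simp only [PySem.Dict.empty, List.nil_append]
  exact List.map_congr_left (fun kg _ => by rw [pvGame_eq])
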